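-- pv_equiv track=rewrite | github.com/kni034/Meta-Hueristics | algorithms.py | car_poss
-- ===== SOURCE A (Python) =====
-- def car_poss(solution, car_id):
--     current_car_num = 1
--     possitions = []
--     for i,elem in enumerate(solution):
--         if current_car_num == car_id:
--             possitions.append(i)
--         if elem == 0:
--             current_car_num += 1
--
--     return possitions
-- ===== SOURCE B (Python) =====
-- def car_poss(solution, car_id):
--     zeros = [i for i, e in enumerate(solution) if e == 0]
--     if car_id < 1 or car_id > len(zeros) + 1:
--         return []
--     start = 0 if car_id == 1 else zeros[car_id - 2] + 1
--     end = zeros[car_id - 1] if car_id <= len(zeros) else len(solution) - 1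
--     return list(range(start, end + 1))
-- ===== Notes on version B (the rewrite author's own statement) =====
-- stated objective: alternative
-- what changed: A walks the solution element by element maintaining a running car counter and conditionally appending each index; B builds the zero-delimiter index table once and computes the target segment as a single contiguous range from that table.
import Mathlib
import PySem

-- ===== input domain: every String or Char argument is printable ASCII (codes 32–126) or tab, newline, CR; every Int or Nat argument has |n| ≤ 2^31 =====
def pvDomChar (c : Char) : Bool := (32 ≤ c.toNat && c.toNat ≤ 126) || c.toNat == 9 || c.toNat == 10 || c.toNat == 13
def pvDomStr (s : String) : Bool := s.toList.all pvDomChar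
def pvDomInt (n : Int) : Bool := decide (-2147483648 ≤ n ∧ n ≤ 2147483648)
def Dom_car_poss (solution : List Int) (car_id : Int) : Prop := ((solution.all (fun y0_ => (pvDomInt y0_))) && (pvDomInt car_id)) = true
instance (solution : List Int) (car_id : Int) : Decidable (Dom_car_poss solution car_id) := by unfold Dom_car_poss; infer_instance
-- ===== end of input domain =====

-- B replaces A's element-by-element conditional collection by a zeros index table plus one range computation (objective: alternative decomposition, same value everywhere).

-- ===== PORT A =====
-- the for-loop over enumerate(solution) with state (current_car_num, possitions)
def carPossLoop (pairs : List (Int × Int)) (car_id : Int) (cur : Int) (acc : List Int) : List Int :=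
  match pairs with
  | [] => acc
  | (i, elem) :: rest =>
    let acc' := if cur = car_id then acc ++ [i] else acc
    let cur' := if elem = 0 then cur + 1 else cur
    carPossLoop rest car_id cur' acc'

def car_poss (solution : List Int) (car_id : Int) : List Int :=
  carPossLoop (PySem.List.enumerate solution 0) car_id 1 []

-- ===== PORT B =====
def car_poss_alt (solution : List Int) (car_id : Int) : List Int :=
  let zeros := (PySem.List.enumerate solution 0).filterMap (fun p => if p.2 = 0 then some p.1 else none)
  if car_id < 1 ∨ car_id > (zeros.length : Int) + 1 then []
  else
    -- both indexings are in range thanks to the guard, so pyGetD's default is never used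
    let start := if car_id = 1 then 0 else PySem.List.pyGetD zeros (car_id - 2) 0 + 1
    let stop  := if car_id ≤ (zeros.length : Int) then PySem.List.pyGetD zeros (car_id - 1) 0
                 else (solution.length : Int) - 1
    PySem.List.pyRange start (stop + 1) 1

-- ===== PRECONDITION & SPEC =====
def Spec_car_poss (solution : List Int) (car_id : Int) (out : List Int) : Prop := out = car_poss_alt solution car_id
instance (solution : List Int) (car_id : Int) (out : List Int) : Decidable (Spec_car_poss solution car_id out) := by unfold Spec_car_poss; infer_instance

-- ===== CLAIM (what is proved, stated in full; the proofs are below) =====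
def Claim_equal_car_poss : Prop := ∀ (solution : List Int) (car_id : Int), Dom_car_poss solution car_id → Spec_car_poss solution car_id (car_poss solution car_id)

-- ===== LEMMAS AND PROOFS =====

-- common spec: segment positions by structural recursion on the solution
def segF : List Int → Int → List Int
  | [], _ => []
  | x :: xs, c => (if c = 1 then [0] else []) ++ (segF xs (if x = 0 then c - 1 else c)).map (· + 1)

lemma map_add_add (l : List Int) (k : Int) :
    (l.map (· + 1)).map (· + k) = l.map (· + (k + 1)) := by
  rw [List.map_map]
  apply List.map_congr_left
  intro a _
  simp
  omega

lemma carPossLoop_spec (s : List Int) : ∀ (k cur : Int) (acc : List Int) (c : Int),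
    carPossLoop (PySem.List.enumerate s k) c cur acc = acc ++ (segF s (c - cur + 1)).map (· + k) := by
  induction s with
  | nil => intro k cur acc c; simp [PySem.List.enumerate_nil, carPossLoop, segF]
  | cons x xs ih =>
    intro k cur acc c
    rw [PySem.List.enumerate_cons]
    show carPossLoop _ c (if x = 0 then cur + 1 else cur) (if cur = c then acc ++ [k] else acc) = _
    rw [ih]
    by_cases h : cur = c
    · have e1 : c - cur + 1 = 1 := by omega
      by_cases hx : x = 0
      · have e2 : c - (cur + 1) + 1 = c - cur + 1 - 1 := by omega
        simp [segF, h, hx, e1, e2, map_add_add] <;> (intros; omega)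
      · simp [segF, h, hx, e1, map_add_add] <;> (intros; omega)
    · have e1 : ¬ (c - cur + 1 = 1) := by omega
      by_cases hx : x = 0
      · have e2 : c - (cur + 1) + 1 = c - cur + 1 - 1 := by omega
        simp [segF, h, hx, e1, e2, map_add_add] <;> (intros; omega)
      · simp [segF, h, hx, e1, map_add_add] <;> (intros; omega)

lemma car_poss_eq_segF (s : List Int) (c : Int) : car_poss s c = segF s c := by
  rw [car_poss, carPossLoop_spec s 0 1 [] c]
  simp [show c - 1 + 1 = c by omega]

-- zeros table of the B port, and its shift law
def zerosOf (s : List Int) : List Int :=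
  (PySem.List.enumerate s 0).filterMap (fun p => if p.2 = 0 then some p.1 else none)

lemma zeros_shift (s : List Int) : ∀ (k : Int),
    (PySem.List.enumerate s k).filterMap (fun p => if p.2 = 0 then some p.1 else none)
      = (zerosOf s).map (· + k) := by
  induction s with
  | nil => intro k; simp [PySem.List.enumerate_nil, zerosOf]
  | cons x xs ih =>
    intro k
    simp only [zerosOf, PySem.List.enumerate_cons, List.filterMap_cons, zero_add]
    rw [ih (k + 1), ih 1]
    by_cases hx : x = 0 <;> simp [hx, map_add_add] <;> (intros; omega)

lemma zerosOf_cons (x : Int) (xs : List Int) :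
    zerosOf (x :: xs) = (if x = 0 then [0] else []) ++ (zerosOf xs).map (· + 1) := by
  by_cases hx : x = 0 <;>
    simp [zerosOf, PySem.List.enumerate_cons, List.filterMap_cons, hx, zeros_shift xs 1]

lemma zerosOf_nonneg (s : List Int) : ∀ y ∈ zerosOf s, 0 ≤ y := by
  induction s with
  | nil => simp [zerosOf, PySem.List.enumerate_nil]
  | cons x xs ih =>
    intro y hy
    rw [zerosOf_cons] at hy
    rcases List.mem_append.1 hy with h | h
    · split at h <;> simp_all
    · obtain ⟨a, ha, rfl⟩ := List.mem_map.1 h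
      have := ih a ha; omega

lemma map_add_one_pyRange (a b : Int) :
    (PySem.List.pyRange a b 1).map (· + 1) = PySem.List.pyRange (a + 1) (b + 1) 1 := by
  rw [PySem.List.pyRange_one, PySem.List.pyRange_one, List.map_map]
  have : b + 1 - (a + 1) = b - a := by omega
  rw [this]
  apply List.map_congr_left
  intro k _; simp [Function.comp]; omega

lemma pyGetD_map_add_one (z : List Int) (j : Int) (h0 : 0 ≤ j) (h1 : j < (z.length : Int)) :
    PySem.List.pyGetD (z.map (· + 1)) j 0 = PySem.List.pyGetD z j 0 + 1 := by
  rw [PySem.List.pyGetD_eq_getElem _ 0 h0 (by simpa using h1),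
      PySem.List.pyGetD_eq_getElem _ 0 h0 h1]
  simp

lemma pyGetD_cons_pos (a : Int) (z : List Int) (j : Int) (h0 : 1 ≤ j) (h1 : j ≤ (z.length : Int)) :
    PySem.List.pyGetD (a :: z) j 0 = PySem.List.pyGetD z (j - 1) 0 := by
  rw [PySem.List.pyGetD_eq_getElem _ 0 (by omega) (by simp; omega),
      PySem.List.pyGetD_eq_getElem _ 0 (by omega) (by omega)]
  have hj : j.toNat = (j - 1).toNat + 1 := by omega
  simp only [hj, List.getElem_cons_succ]

lemma zerosOf_pyGetD_nonneg (xs : List Int) (j : Int) (h0 : 0 ≤ j) (h1 : j < ((zerosOf xs).length : Int)) :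
    0 ≤ PySem.List.pyGetD (zerosOf xs) j 0 := by
  rw [PySem.List.pyGetD_eq_getElem _ 0 h0 h1]
  exact zerosOf_nonneg xs _ (List.getElem_mem _)

lemma alt_def (s : List Int) (c : Int) :
    car_poss_alt s c =
      if c < 1 ∨ c > ((zerosOf s).length : Int) + 1 then []
      else PySem.List.pyRange
        (if c = 1 then 0 else PySem.List.pyGetD (zerosOf s) (c - 2) 0 + 1)
        ((if c ≤ ((zerosOf s).length : Int) then PySem.List.pyGetD (zerosOf s) (c - 1) 0
          else (s.length : Int) - 1) + 1) 1 := rfl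

lemma alt_cons (x : Int) (xs : List Int) (c : Int) :
    car_poss_alt (x :: xs) c
      = (if c = 1 then [0] else []) ++ (car_poss_alt xs (if x = 0 then c - 1 else c)).map (· + 1) := by
  have hL : (0 : Int) ≤ ((zerosOf xs).length : Int) := Int.natCast_nonneg _
  by_cases hx : x = 0
  · -- x = 0 : the zeros table gains a leading 0, shifting every index by one
    have hz : zerosOf (x :: xs) = 0 :: (zerosOf xs).map (· + 1) := by
      rw [zerosOf_cons, if_pos hx]; rfl
    have hlen : ((zerosOf (x :: xs)).length : Int) = ((zerosOf xs).length : Int) + 1 := by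
      rw [hz]; simp
    rw [alt_def (x :: xs), alt_def xs, hlen, if_pos hx]
    by_cases h1 : c < 1 ∨ c > ((zerosOf xs).length : Int) + 1 + 1
    · rw [if_pos h1, if_neg (by omega : ¬ c = 1), if_pos (by omega : c - 1 < 1 ∨ c - 1 > ((zerosOf xs).length : Int) + 1)]
      simp
    · have hn := not_or.1 h1
      have hc1 : 1 ≤ c := by omega
      have hc2 : c ≤ ((zerosOf xs).length : Int) + 2 := by omega
      rw [if_neg h1]
      by_cases hc : c = 1
      · subst hc
        rw [if_pos rfl, if_pos rfl, if_pos (by omega : (1:Int) ≤ ((zerosOf xs).length : Int) + 1),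
            if_pos (by omega : (1:Int) - 1 < 1 ∨ (1:Int) - 1 > ((zerosOf xs).length : Int) + 1), hz]
        norm_num [PySem.List.pyGetD_zero_cons]
        decide
      · rw [if_neg hc, if_neg hc,
            if_neg (by omega : ¬ (c - 1 < 1 ∨ c - 1 > ((zerosOf xs).length : Int) + 1))]
        have hstart : PySem.List.pyGetD (zerosOf (x :: xs)) (c - 2) 0 + 1
            = (if c - 1 = 1 then 0 else PySem.List.pyGetD (zerosOf xs) (c - 1 - 2) 0 + 1) + 1 := by
          by_cases hc2' : c = 2
          · subst hc2'
            rw [hz]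
            norm_num [PySem.List.pyGetD_zero_cons]
          · rw [if_neg (by omega : ¬ c - 1 = 1), hz,
                pyGetD_cons_pos _ _ _ (by omega) (by simp; omega),
                pyGetD_map_add_one _ _ (by omega) (by omega)]
            have : c - 2 - 1 = c - 1 - 2 := by omega
            rw [this]
        have hstop : (if c ≤ ((zerosOf xs).length : Int) + 1
              then PySem.List.pyGetD (zerosOf (x :: xs)) (c - 1) 0
              else ((x :: xs).length : Int) - 1)
            = (if c - 1 ≤ ((zerosOf xs).length : Int)
              then PySem.List.pyGetD (zerosOf xs) (c - 1 - 1) 0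
              else ((xs).length : Int) - 1) + 1 := by
          by_cases hcl : c ≤ ((zerosOf xs).length : Int) + 1
          · rw [if_pos hcl, if_pos (by omega), hz,
                pyGetD_cons_pos _ _ _ (by omega) (by simp; omega),
                pyGetD_map_add_one _ _ (by omega) (by omega)]
          · rw [if_neg hcl, if_neg (by omega)]
            simp only [List.length_cons]
            omega
        rw [hstart, hstop, map_add_one_pyRange, List.nil_append]
  · -- x ≠ 0 : the zeros table is only shifted by one
    have hz : zerosOf (x :: xs) = (zerosOf xs).map (· + 1) := by
      rw [zerosOf_cons, if_neg hx]; rfl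
    have hlen : ((zerosOf (x :: xs)).length : Int) = ((zerosOf xs).length : Int) := by
      rw [hz]; simp
    rw [alt_def (x :: xs), alt_def xs, hlen, if_neg hx]
    by_cases h1 : c < 1 ∨ c > ((zerosOf xs).length : Int) + 1
    · rw [if_pos h1, if_pos h1, if_neg (by omega : ¬ c = 1)]
      simp
    · have hn := not_or.1 h1
      rw [if_neg h1, if_neg h1]
      by_cases hc : c = 1
      · subst hc
        rw [if_pos rfl, if_pos rfl]
        by_cases hl : (1:Int) ≤ ((zerosOf xs).length : Int)
        · rw [if_pos hl, if_pos hl, hz, pyGetD_map_add_one _ _ (by omega) (by omega)]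
          have hnn : 0 ≤ PySem.List.pyGetD (zerosOf xs) (1 - 1) 0 :=
            zerosOf_pyGetD_nonneg xs _ (by omega) (by omega)
          rw [PySem.List.pyRange_one_cons (by omega), map_add_one_pyRange]
          norm_num
        · rw [if_neg hl, if_neg hl]
          have hlc : ((x :: xs).length : Int) = ((xs).length : Int) + 1 := by simp
          rw [hlc, PySem.List.pyRange_one_cons (by omega), map_add_one_pyRange]
          norm_num
      · rw [if_neg hc, if_neg hc, hz]
        have hstart : PySem.List.pyGetD ((zerosOf xs).map (· + 1)) (c - 2) 0 + 1
            = (PySem.List.pyGetD (zerosOf xs) (c - 2) 0 + 1) + 1 := by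
          rw [pyGetD_map_add_one _ _ (by omega) (by omega)]
        have hstop : (if c ≤ ((zerosOf xs).length : Int)
              then PySem.List.pyGetD ((zerosOf xs).map (· + 1)) (c - 1) 0
              else ((x :: xs).length : Int) - 1)
            = (if c ≤ ((zerosOf xs).length : Int)
              then PySem.List.pyGetD (zerosOf xs) (c - 1) 0
              else ((xs).length : Int) - 1) + 1 := by
          by_cases hcl : c ≤ ((zerosOf xs).length : Int)
          · rw [if_pos hcl, if_pos hcl, pyGetD_map_add_one _ _ (by omega) (by omega)]
          · rw [if_neg hcl, if_neg hcl]
            simp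
        rw [hstart, hstop, map_add_one_pyRange, List.nil_append, if_neg hc]

lemma car_poss_alt_eq_segF (s : List Int) : ∀ (c : Int), car_poss_alt s c = segF s c := by
  induction s with
  | nil =>
    intro c
    rw [alt_def]
    simp only [zerosOf, PySem.List.enumerate_nil, List.filterMap_nil, List.length_nil, segF]
    split
    · rfl
    · rename_i h
      have hc : c = 1 := by
        have := not_or.1 h
        omega
      simp [hc]
  | cons x xs ih =>
    intro c
    rw [alt_cons, segF, ih]

-- ===== VERDICT (by name: the statement is the Claim_ definition above) =====
theorem car_poss_spec : Claim_equal_car_poss := by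
  intro s c _
  show car_poss s c = car_poss_alt s c
  rw [car_poss_eq_segF, car_poss_alt_eq_segF]
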